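-- pv_equiv track=rewrite | github.com/poricf/LEETCODEY1 | 3315-construct-the-minimum-bitwise-array-ii/3315-construct-the-minimum-bitwise-array-ii.py | minBitwiseArray
-- ===== SOURCE A (Python) =====
-- from typing import List
--
-- def minBitwiseArray(nums: List[int]) -> List[int]:
--     '''
--     eg->
--     0000
--     0001
--     0010
--     0011
--     0100
--     0101
--     0110
--     0111
--     1000
--     1001
--     1010
--
--     A = KTHBIT ON
--     B = LAST K-1 BITS
--
--     or just 1 bit change
--
--
--
--     '''
--
--     ans = []
--     for num in nums:
--         N = num.bit_length()
--         val = float("inf")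
--         for i in range(N + 1):
--             temp = num & ~(1 << i)
--
--             if temp | (temp + 1 )== num:
--                 val = min(temp , val)
--             if temp | (temp - 1) == num:
--                 val = min(temp - 1 , val)
--
--
--
--         ans.append(val if val != float("inf") else -1)
--
--     return ans
-- ===== SOURCE B (Python) =====
-- from typing import List
--
-- def minBitwiseArray(nums: List[int]) -> List[int]:
--     def best(num: int) -> int:
--         if num % 2 == 0:
--             return -1                 # ans | (ans + 1) is always odd: no answer
--         b = ~num & (num + 1)          # lowest zero bit of num (0 when num has none)
--         return num & ~(b >> 1)        # clear the bit just below it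
--     return [best(num) for num in nums]
-- ===== Notes on version B (the rewrite author's own statement) =====
-- stated objective: faster
-- what changed: A searches every bit position of each num (an inner loop over bit_length with two or-checks and a running min); B computes the same minimum with a constant-time bit trick per element: isolate the lowest zero bit of num with ~num & (num+1) and clear the bit below it.
-- intended difference: For the element -1 (binary all ones) every ans satisfies ans|(ans+1)==-1 so no minimum exists; A returns -3, an artefact of its bit_length-bounded search, while B returns -1, the list's no-answer sentinel (there is no zero bit whose neighbour could be cleared), which is the intended value on this unspecified corner. — e.g. on minBitwiseArray([-1]): A returns [-3], B returns [-1]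
import Mathlib
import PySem

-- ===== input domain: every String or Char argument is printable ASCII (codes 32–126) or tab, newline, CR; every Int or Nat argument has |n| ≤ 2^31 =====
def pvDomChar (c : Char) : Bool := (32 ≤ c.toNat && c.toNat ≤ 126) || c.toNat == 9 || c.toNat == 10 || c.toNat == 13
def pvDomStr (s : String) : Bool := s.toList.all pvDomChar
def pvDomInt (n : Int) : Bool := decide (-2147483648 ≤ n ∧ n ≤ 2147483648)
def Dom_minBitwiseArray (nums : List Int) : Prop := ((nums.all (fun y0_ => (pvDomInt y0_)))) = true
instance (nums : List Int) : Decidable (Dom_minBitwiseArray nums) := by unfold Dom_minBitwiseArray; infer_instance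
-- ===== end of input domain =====

-- B replaces A's per-element scan over all bit positions by a constant-time bit trick
-- (isolate the lowest zero bit of num, clear the bit below it); same values everywhere
-- except for the element -1, where A's bit_length-bounded search returns an accidental -3
-- and B returns the no-answer sentinel -1 (see D_minBitwiseArray).


-- ===== PORT A =====
def minBitwiseArray (nums : List Int) : List Int :=
  nums.foldl (fun ans num =>
    let N : Nat := PySem.Int.bitLength num
    let val : Option Int :=
      (PySem.List.pyRange 0 ((N : Int) + 1) 1).foldl (fun val i =>
        let temp : Int := PySem.Int.band num (Int.not ((1 : Int) <<< i.toNat))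
        let val : Option Int :=
          if PySem.Int.bor temp (temp + 1) == num then
            some (match val with | none => temp | some v => min temp v)
          else val
        if PySem.Int.bor temp (temp - 1) == num then
          some (match val with | none => temp - 1 | some v => min (temp - 1) v)
        else val) none
    ans ++ [match val with | none => -1 | some v => v]) []

-- ===== PORT B =====
-- helper `best` of Source B
def pvBest (num : Int) : Int :=
  if PySem.Int.mod num 2 == 0 then -1
  else
    let b : Int := PySem.Int.band (Int.not num) (num + 1)
    PySem.Int.band num (Int.not (b >>> (1 : Nat)))

def minBitwiseArray_alt (nums : List Int) : List Int := nums.map pvBest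

-- ===== PRECONDITION & SPEC =====
-- For the element -1 (binary all ones) every ans satisfies ans|(ans+1) == -1 so no minimum
-- exists; A returns -3, an artefact of its bit_length-bounded search, while B returns the
-- no-answer sentinel -1, the intended value on this unspecified corner.
def D_minBitwiseArray (nums : List Int) : Prop := (-1 : Int) ∈ nums
instance (nums : List Int) : Decidable (D_minBitwiseArray nums) := by unfold D_minBitwiseArray; infer_instance
def Spec_minBitwiseArray (nums : List Int) (out : List Int) : Prop := ¬ D_minBitwiseArray nums → out = minBitwiseArray_alt nums
instance (nums : List Int) (out : List Int) : Decidable (Spec_minBitwiseArray nums out) := by unfold Spec_minBitwiseArray; infer_instance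
def pvDiffWitness_minBitwiseArray : List Int := [-1]
def pvDiffWitnessOut_minBitwiseArray : (List Int) × (List Int) := ([-3], [-1])

-- ===== CLAIM (what is proved, stated in full; the proofs are below) =====
def Claim_unchanged_minBitwiseArray : Prop := ∀ (nums : List Int), Dom_minBitwiseArray nums → Spec_minBitwiseArray nums (minBitwiseArray nums)
def Claim_changed_minBitwiseArray : Prop := Dom_minBitwiseArray (pvDiffWitness_minBitwiseArray) ∧ D_minBitwiseArray (pvDiffWitness_minBitwiseArray) ∧ minBitwiseArray (pvDiffWitness_minBitwiseArray) = pvDiffWitnessOut_minBitwiseArray.1 ∧ minBitwiseArray_alt (pvDiffWitness_minBitwiseArray) = pvDiffWitnessOut_minBitwiseArray.2 ∧ pvDiffWitnessOut_minBitwiseArray.1 ≠ pvDiffWitnessOut_minBitwiseArray.2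
def Claim_exact_minBitwiseArray : Prop := ∀ (nums : List Int), Dom_minBitwiseArray nums → D_minBitwiseArray nums → minBitwiseArray nums ≠ minBitwiseArray_alt nums

-- ===== LEMMAS AND PROOFS =====

/- ---------- generic Int/Nat bit toolkit ---------- -/

-- Nat: testBit of 2^i * q + r with r < 2^i
theorem pvNatS (i : ℕ) (q r j : ℕ) (hr : r < 2^i) :
    (2^i * q + r).testBit j = if j < i then r.testBit j else q.testBit (j - i) := by
  induction i generalizing j r with
  | zero =>
    interval_cases r
    simp
  | succ i ih =>
    cases j with
    | zero =>
      have h2 : (2^(i+1) * q + r) % 2 = r % 2 := by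
        have : 2^(i+1) * q = 2 * (2^i * q) := by ring
        omega
      simp [Nat.testBit_zero, h2]
    | succ j =>
      have hdiv : (2^(i+1) * q + r) / 2 = 2^i * q + r / 2 := by
        have : 2^(i+1) * q + r = 2 * (2^i * q) + r := by ring
        omega
      rw [Nat.testBit_succ, hdiv, ih (r/2) j (by omega)]
      rw [Nat.testBit_succ]
      rcases Nat.lt_or_ge j i with h | h
      · simp [h]
      · simp [Nat.not_lt.mpr h, Nat.not_lt.mpr (Nat.succ_le_succ h)]

-- Nat: complement within i bits
theorem pvNatC (i : ℕ) (r j : ℕ) (hr : r < 2^i) (hj : j < i) :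
    (2^i - 1 - r).testBit j = !r.testBit j := by
  induction i generalizing r j with
  | zero => omega
  | succ i ih =>
    cases j with
    | zero =>
      have h2 : (2^(i+1) - 1 - r) % 2 = 1 - r % 2 := by
        have : 2^(i+1) = 2 * 2^i := by ring
        omega
      rw [Nat.testBit_zero, Nat.testBit_zero]
      rcases Nat.mod_two_eq_zero_or_one r with h | h <;> simp [h2, h]
    | succ j =>
      have hdiv : (2^(i+1) - 1 - r) / 2 = 2^i - 1 - r / 2 := by
        have h2 : 2^(i+1) = 2 * 2^i := by ring
        omega
      rw [Nat.testBit_succ, Nat.testBit_succ, hdiv, ih (r/2) j (by omega) (by omega)]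

theorem pvTbNot (a : ℤ) (j : ℕ) : (Int.not a).testBit j = !a.testBit j := by
  cases a with
  | ofNat n => rfl
  | negSucc n => show (n:ℕ).testBit j = !(!(n:ℕ).testBit j) ; simp

-- Nat: land on binary decomposition
theorem pvLandRec (a b x y : ℕ) (hx : x < 2) (hy : y < 2) :
    (2*a + x) &&& (2*b + y) = 2*(a &&& b) + (x &&& y) := by
  apply Nat.eq_of_testBit_eq
  intro j
  rw [Nat.testBit_land]
  cases j with
  | zero =>
    rw [Nat.testBit_zero, Nat.testBit_zero, Nat.testBit_zero]
    interval_cases x <;> interval_cases y <;> simp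
  | succ j =>
    rw [Nat.testBit_succ, Nat.testBit_succ, Nat.testBit_succ]
    have h1 : (2*a + x) / 2 = a := by omega
    have h2 : (2*b + y) / 2 = b := by omega
    have hxy : x &&& y < 2 := Nat.lt_of_le_of_lt Nat.and_le_left hx
    have h3 : (2*(a &&& b) + (x &&& y)) / 2 = a &&& b := by omega
    rw [h1, h2, h3, Nat.testBit_land]

-- Nat: testBit of m - (m &&& n)
theorem pvTbSub (j : ℕ) : ∀ (m n : ℕ), (m - (m &&& n)).testBit j = (m.testBit j && !n.testBit j) := by
  induction j with
  | zero =>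
    intro m n
    rw [Nat.testBit_zero, Nat.testBit_zero, Nat.testBit_zero]
    have hle : m &&& n ≤ m := Nat.and_le_left
    have h2 : (m &&& n) % 2 = m % 2 &&& n % 2 := by
      simpa using (Nat.and_mod_two_pow (a := m) (b := n) (n := 1))
    rcases Nat.mod_two_eq_zero_or_one m with hm | hm <;>
      rcases Nat.mod_two_eq_zero_or_one n with hn | hn <;>
      rw [hm, hn] at h2 <;>
      first
      | (replace h2 : (m &&& n) % 2 = 0 := h2.trans (by decide)
         first
         | (have hmc : (m - (m &&& n)) % 2 = 1 := by omega
            rw [hmc, hm, hn]; rfl)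
         | (have hmc : (m - (m &&& n)) % 2 = 0 := by omega
            rw [hmc, hm, hn]; rfl))
      | (replace h2 : (m &&& n) % 2 = 1 := h2.trans (by decide)
         have hmc : (m - (m &&& n)) % 2 = 0 := by omega
         rw [hmc, hm, hn]; rfl)
  | succ j ih =>
    intro m n
    rw [Nat.testBit_succ, Nat.testBit_succ, Nat.testBit_succ]
    have hland : m &&& n = 2 * ((m/2) &&& (n/2)) + (m % 2 &&& n % 2) := by
      have h := pvLandRec (m/2) (n/2) (m%2) (n%2) (Nat.mod_lt _ (by norm_num)) (Nat.mod_lt _ (by norm_num))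
      calc m &&& n = (2*(m/2) + m%2) &&& (2*(n/2) + n%2) := by rw [Nat.div_add_mod, Nat.div_add_mod]
        _ = 2*((m/2) &&& (n/2)) + (m%2 &&& n%2) := h
    have hA : (m/2) &&& (n/2) ≤ m/2 := Nat.and_le_left
    have hB : m % 2 &&& n % 2 ≤ m % 2 := Nat.and_le_left
    have hsub : (m - (m &&& n)) / 2 = m/2 - ((m/2) &&& (n/2)) := by omega
    rw [hsub, ih]

theorem pvTbBand (a b : ℤ) (j : ℕ) :
    (PySem.Int.band a b).testBit j = (a.testBit j && b.testBit j) := by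
  cases a with
  | ofNat m =>
    cases b with
    | ofNat n =>
      rw [PySem.Int.band]
      simp only [Int.ofNat_eq_natCast]
      rw [if_pos (Int.natCast_nonneg m), if_pos (Int.natCast_nonneg n)]
      simp only [Int.toNat_natCast]
      show (m &&& n).testBit j = (m.testBit j && n.testBit j)
      exact Nat.testBit_land m n j
    | negSucc n =>
      rw [PySem.Int.band]
      simp only [Int.ofNat_eq_natCast]
      rw [if_pos (Int.natCast_nonneg m), if_neg (by rw [Int.negSucc_eq]; omega)]
      have h1 : (-(Int.negSucc n) - 1).toNat = n := by simp [Int.negSucc_eq]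
      simp only [Int.toNat_natCast, h1]
      show (m - (m &&& n) : ℕ).testBit j = (m.testBit j && !n.testBit j)
      exact pvTbSub j m n
  | negSucc m =>
    cases b with
    | ofNat n =>
      rw [PySem.Int.band]
      simp only [Int.ofNat_eq_natCast]
      rw [if_neg (by rw [Int.negSucc_eq]; omega), if_pos (Int.natCast_nonneg n)]
      have h1 : (-(Int.negSucc m) - 1).toNat = m := by simp [Int.negSucc_eq]
      simp only [Int.toNat_natCast, h1]
      show (n - (n &&& m) : ℕ).testBit j = (!m.testBit j && n.testBit j)
      rw [pvTbSub j n m]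
      exact Bool.and_comm _ _
    | negSucc n =>
      rw [PySem.Int.band]
      rw [if_neg (by rw [Int.negSucc_eq]; omega), if_neg (by rw [Int.negSucc_eq]; omega)]
      have h1 : (-(Int.negSucc m) - 1).toNat = m := by simp [Int.negSucc_eq]
      have h2 : (-(Int.negSucc n) - 1).toNat = n := by simp [Int.negSucc_eq]
      rw [h1, h2]
      have h3 : (-((m ||| n : ℕ) : ℤ) - 1) = Int.negSucc (m ||| n) := by
        rw [Int.negSucc_eq]; ring
      rw [h3]
      show (!(m ||| n).testBit j) = (!m.testBit j && !n.testBit j)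
      rw [Nat.testBit_lor]
      exact Bool.not_or _ _

theorem pvTbBor (a b : ℤ) (j : ℕ) :
    (PySem.Int.bor a b).testBit j = (a.testBit j || b.testBit j) := by
  cases a with
  | ofNat m =>
    cases b with
    | ofNat n =>
      rw [PySem.Int.bor]
      simp only [Int.ofNat_eq_natCast]
      rw [if_pos (Int.natCast_nonneg m), if_pos (Int.natCast_nonneg n)]
      simp only [Int.toNat_natCast]
      show (m ||| n).testBit j = (m.testBit j || n.testBit j)
      exact Nat.testBit_lor m n j
    | negSucc n =>
      rw [PySem.Int.bor]
      simp only [Int.ofNat_eq_natCast]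
      rw [if_pos (Int.natCast_nonneg m), if_neg (by rw [Int.negSucc_eq]; omega)]
      have h1 : (-(Int.negSucc n) - 1).toNat = n := by simp [Int.negSucc_eq]
      simp only [Int.toNat_natCast, h1]
      have h3 : (-(((n - (n &&& m) : ℕ)) : ℤ) - 1) = Int.negSucc (n - (n &&& m)) := by
        rw [Int.negSucc_eq]; ring
      rw [h3]
      show (!(n - (n &&& m)).testBit j) = (m.testBit j || !n.testBit j)
      rw [pvTbSub j n m]
      cases m.testBit j <;> cases n.testBit j <;> rfl
  | negSucc m =>
    cases b with
    | ofNat n =>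
      rw [PySem.Int.bor]
      simp only [Int.ofNat_eq_natCast]
      rw [if_neg (by rw [Int.negSucc_eq]; omega), if_pos (Int.natCast_nonneg n)]
      have h1 : (-(Int.negSucc m) - 1).toNat = m := by simp [Int.negSucc_eq]
      simp only [Int.toNat_natCast, h1]
      have h3 : (-(((m - (m &&& n) : ℕ)) : ℤ) - 1) = Int.negSucc (m - (m &&& n)) := by
        rw [Int.negSucc_eq]; ring
      rw [h3]
      show (!(m - (m &&& n)).testBit j) = (!m.testBit j || n.testBit j)
      rw [pvTbSub j m n]
      cases m.testBit j <;> cases n.testBit j <;> rfl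
    | negSucc n =>
      rw [PySem.Int.bor]
      rw [if_neg (by rw [Int.negSucc_eq]; omega), if_neg (by rw [Int.negSucc_eq]; omega)]
      have h1 : (-(Int.negSucc m) - 1).toNat = m := by simp [Int.negSucc_eq]
      have h2 : (-(Int.negSucc n) - 1).toNat = n := by simp [Int.negSucc_eq]
      rw [h1, h2]
      have h3 : (-((m &&& n : ℕ) : ℤ) - 1) = Int.negSucc (m &&& n) := by
        rw [Int.negSucc_eq]; ring
      rw [h3]
      show (!(m &&& n).testBit j) = (!m.testBit j || !n.testBit j)
      rw [Nat.testBit_land]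
      cases m.testBit j <;> cases n.testBit j <;> rfl

-- Int extensionality by bits
theorem pvIntExt (a b : ℤ) (h : ∀ j, a.testBit j = b.testBit j) : a = b := by
  cases a with
  | ofNat m =>
    cases b with
    | ofNat n =>
      have : m = n := Nat.eq_of_testBit_eq (fun j => h j)
      rw [this]
    | negSucc n =>
      exfalso
      have hj := h (max m n + 1)
      have h1 : m.testBit (max m n + 1) = false :=
        Nat.testBit_lt_two_pow (lt_of_le_of_lt (Nat.le_max_left m n) (Nat.lt_two_pow_self.trans_le (Nat.pow_le_pow_right (by norm_num) (by omega))))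
      have h2 : n.testBit (max m n + 1) = false :=
        Nat.testBit_lt_two_pow (lt_of_le_of_lt (Nat.le_max_right m n) (Nat.lt_two_pow_self.trans_le (Nat.pow_le_pow_right (by norm_num) (by omega))))
      rw [show (Int.ofNat m).testBit (max m n + 1) = m.testBit (max m n + 1) from rfl,
          show (Int.negSucc n).testBit (max m n + 1) = !n.testBit (max m n + 1) from rfl, h1, h2] at hj
      exact absurd hj (by decide)
  | negSucc m =>
    cases b with
    | ofNat n =>
      exfalso
      have hj := h (max m n + 1)
      have h1 : m.testBit (max m n + 1) = false :=
        Nat.testBit_lt_two_pow (lt_of_le_of_lt (Nat.le_max_left m n) (Nat.lt_two_pow_self.trans_le (Nat.pow_le_pow_right (by norm_num) (by omega))))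
      have h2 : n.testBit (max m n + 1) = false :=
        Nat.testBit_lt_two_pow (lt_of_le_of_lt (Nat.le_max_right m n) (Nat.lt_two_pow_self.trans_le (Nat.pow_le_pow_right (by norm_num) (by omega))))
      rw [show (Int.negSucc m).testBit (max m n + 1) = !m.testBit (max m n + 1) from rfl,
          show (Int.ofNat n).testBit (max m n + 1) = n.testBit (max m n + 1) from rfl, h1, h2] at hj
      exact absurd hj (by decide)
    | negSucc n =>
      have : m = n := Nat.eq_of_testBit_eq (fun j => by
        have hb := h j
        rw [show (Int.negSucc m).testBit j = !m.testBit j from rfl,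
            show (Int.negSucc n).testBit j = !n.testBit j from rfl] at hb
        exact Bool.not_inj hb)
      rw [this]

theorem pvTbNe {a b : ℤ} (j : ℕ) (h : a.testBit j ≠ b.testBit j) : a ≠ b :=
  fun he => h (he ▸ rfl)

-- Int: testBit of 2^i * q + r with r < 2^i (q : ℤ, r : ℕ)
theorem pvItbS (i : ℕ) (q : ℤ) (r j : ℕ) (hr : r < 2^i) :
    ((2^i : ℤ) * q + (r : ℤ)).testBit j = if j < i then r.testBit j else q.testBit (j - i) := by
  cases q with
  | ofNat n =>
    have he : ((2^i : ℤ) * (Int.ofNat n) + (r : ℤ)) = ((2^i * n + r : ℕ) : ℤ) := by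
      simp only [Int.ofNat_eq_natCast]; push_cast; ring
    rw [he]
    show (2^i * n + r).testBit j = _
    rw [pvNatS i n r j hr]
    rfl
  | negSucc n =>
    have he : ((2^i : ℤ) * (Int.negSucc n) + (r : ℤ)) = Int.negSucc (2^i * n + (2^i - 1 - r)) := by
      rw [Int.negSucc_eq, Int.negSucc_eq]
      have h1 : (2^i : ℕ) ≥ r + 1 := hr
      push_cast [Nat.sub_sub]
      rw [Nat.cast_sub (by omega)]
      push_cast
      ring
    rw [he]
    show (!(2^i * n + (2^i - 1 - r)).testBit j) = _
    rw [pvNatS i n (2^i - 1 - r) j (by omega)]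
    rcases Nat.lt_or_ge j i with h | h
    · rw [if_pos h, if_pos h, pvNatC i r j hr h, Bool.not_not]
    · rw [if_neg (by omega), if_neg (by omega)]
      rfl

theorem pvItbZero (x : ℤ) : x.testBit 0 = decide (x % 2 = 1) := by
  cases x with
  | ofNat n =>
    show n.testBit 0 = _
    rw [Nat.testBit_zero, decide_eq_decide]
    simp only [Int.ofNat_eq_natCast]
    omega
  | negSucc n =>
    show (!n.testBit 0) = _
    rw [Nat.testBit_zero]
    have hiff : ((Int.negSucc n) % 2 = 1) ↔ ¬ (n % 2 = 1) := by
      rw [Int.negSucc_eq]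
      omega
    rcases Nat.mod_two_eq_zero_or_one n with h | h <;> simp [h] at hiff ⊢ <;> simp [hiff]

theorem pvShl (n : ℕ) : ((1:ℤ) <<< ((n:ℕ) : ℤ)) = ((2^n : ℕ) : ℤ) := by
  have h : ((1:ℤ) <<< ((n:ℕ) : ℤ)) = ((Nat.shiftLeft' false 1 n : ℕ) : ℤ) := rfl
  rw [h, Nat.shiftLeft'_false, Nat.shiftLeft_eq, one_mul]

theorem pvShr (n : ℕ) : (((n : ℕ) : ℤ) >>> (1 : ℕ)) = ((n / 2 : ℕ) : ℤ) := by
  rw [Int.shiftRight_eq]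
  rfl

/- ---------- shape lemmas ---------- -/

theorem pvTbCast (n : ℕ) (j : ℕ) : ((n : ℕ) : ℤ).testBit j = n.testBit j := rfl

theorem pvPowSucc (i : ℕ) : (2:ℕ)^i < 2^(i+1) := by
  have : 0 < (2:ℕ)^i := Nat.two_pow_pos i
  calc (2:ℕ)^i < 2^i + 2^i := by omega
    _ = 2^(i+1) := by ring



-- clearing a set bit
theorem pvMset (i : ℕ) (q : ℤ) (r : ℕ) (hr : r < 2^i) :
    PySem.Int.band ((2^(i+1) : ℤ)*q + (2^i : ℕ) + (r : ℕ)) (Int.not ((2^i : ℕ) : ℤ)) =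
      (2^(i+1) : ℤ)*q + (r : ℕ) := by
  have h1 : ((2^(i+1) : ℤ)*q + (2^i : ℕ) + (r : ℕ)) = (2^(i+1) : ℤ)*q + ((2^i + r : ℕ) : ℤ) := by
    push_cast; ring
  apply pvIntExt
  intro j
  rw [pvTbBand, pvTbNot, h1, pvTbCast,
      pvItbS (i+1) q (2^i + r) j (by have := pvPowSucc i; omega),
      pvItbS (i+1) q r j (lt_trans hr (pvPowSucc i)),
      Nat.testBit_two_pow]
  have hs : (2^i + r).testBit j = ((2:ℕ)^i * 1 + r).testBit j := by rw [Nat.mul_one]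
  rcases Nat.lt_trichotomy j i with h | h | h
  · rw [if_pos (by omega), if_pos (by omega), hs, pvNatS i 1 r j hr, if_pos h]
    simp [show ¬ (i = j) by omega]
  · subst h
    rw [if_pos (by omega), if_pos (by omega), hs, pvNatS j 1 r j hr, if_neg (by omega)]
    simp [Nat.testBit_lt_two_pow hr, Nat.sub_self]
  · rcases Nat.lt_or_ge j (i+1) with h2 | h2
    · omega
    · rw [if_neg (by omega), if_neg (by omega)]
      simp [show ¬ (i = j) by omega]

-- clearing a clear bit
theorem pvMclear (i : ℕ) (q : ℤ) (r : ℕ) (hr : r < 2^i) :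
    PySem.Int.band ((2^(i+1) : ℤ)*q + (r : ℕ)) (Int.not ((2^i : ℕ) : ℤ)) =
      (2^(i+1) : ℤ)*q + (r : ℕ) := by
  apply pvIntExt
  intro j
  rw [pvTbBand, pvTbNot, pvTbCast,
      pvItbS (i+1) q r j (lt_trans hr (pvPowSucc i)),
      Nat.testBit_two_pow]
  rcases Nat.lt_trichotomy j i with h | h | h
  · rw [if_pos (by omega)]
    simp [show ¬ (i = j) by omega]
  · subst h
    rw [if_pos (by omega)]
    simp [Nat.testBit_lt_two_pow hr]
  · rcases Nat.lt_or_ge j (i+1) with h2 | h2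
    · omega
    · rw [if_neg (by omega)]
      simp [show ¬ (i = j) by omega]

-- or with successor on trailing-ones shape
theorem pvM2 (t : ℕ) (q : ℤ) :
    PySem.Int.bor ((2^(t+1) : ℤ)*q + ((2^t - 1 : ℕ) : ℤ)) (((2^(t+1) : ℤ)*q + ((2^t - 1 : ℕ) : ℤ)) + 1) =
      (2^(t+1) : ℤ)*q + ((2^t - 1 : ℕ) : ℤ) + 2^t := by
  have hp : (1:ℕ) ≤ 2^t := Nat.one_le_two_pow
  have h1 : ((2^(t+1) : ℤ)*q + ((2^t - 1 : ℕ) : ℤ)) + 1 = (2^(t+1) : ℤ)*q + ((2^t : ℕ) : ℤ) := by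
    push_cast [hp]; ring
  have h2 : (2^(t+1) : ℤ)*q + ((2^t - 1 : ℕ) : ℤ) + 2^t = (2^(t+1) : ℤ)*q + ((2^(t+1) - 1 : ℕ) : ℤ) := by
    have hq : (1:ℕ) ≤ 2^(t+1) := Nat.one_le_two_pow
    push_cast [hp, hq]; ring
  rw [h1, h2]
  apply pvIntExt
  intro j
  rw [pvTbBor,
      pvItbS (t+1) q (2^t - 1) j (by have := pvPowSucc t; omega),
      pvItbS (t+1) q (2^t) j (pvPowSucc t),
      pvItbS (t+1) q (2^(t+1) - 1) j (by have : (1:ℕ) ≤ 2^(t+1) := Nat.one_le_two_pow; omega)]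
  rcases Nat.lt_or_ge j (t+1) with h | h
  · rw [if_pos h, if_pos h, if_pos h, Nat.testBit_two_pow_sub_one, Nat.testBit_two_pow_sub_one,
        Nat.testBit_two_pow]
    rcases Nat.lt_trichotomy j t with h3 | h3 | h3
    · simp [h3, show ¬ (t = j) by omega, show j < t+1 by omega]
    · simp [h3, show ¬ (j < j) by omega]
    · omega
  · rw [if_neg (by omega), if_neg (by omega), if_neg (by omega), Bool.or_self]

-- odd a: a | (a-1) = a
theorem pvM3 (q : ℤ) : PySem.Int.bor (2*q + 1) (2*q) = 2*q + 1 := by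
  have ha : (2*q + 1) = (2^1 : ℤ)*q + ((1:ℕ) : ℤ) := by push_cast; ring
  have hb : (2*q : ℤ) = (2^1 : ℤ)*q + ((0:ℕ) : ℤ) := by push_cast; ring
  rw [ha, hb]
  apply pvIntExt
  intro j
  rw [pvTbBor, pvItbS 1 q 1 j (by norm_num), pvItbS 1 q 0 j (by norm_num)]
  rcases Nat.lt_or_ge j 1 with h | h
  · interval_cases j
    simp
  · rw [if_neg (by omega), if_neg (by omega), Bool.or_self]

-- lowest zero bit: ~num & (num+1) for num = 2^(k+2) m + 2^(k+1) - 1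
theorem pvM6 (k : ℕ) (m : ℤ) :
    PySem.Int.band (Int.not ((2^(k+2) : ℤ)*m + ((2^(k+1) - 1 : ℕ) : ℤ)))
      (((2^(k+2) : ℤ)*m + ((2^(k+1) - 1 : ℕ) : ℤ)) + 1) = ((2^(k+1) : ℕ) : ℤ) := by
  have hp : (1:ℕ) ≤ 2^(k+1) := Nat.one_le_two_pow
  have h1 : ((2^(k+2) : ℤ)*m + ((2^(k+1) - 1 : ℕ) : ℤ)) + 1 = (2^(k+2) : ℤ)*m + ((2^(k+1) : ℕ) : ℤ) := by
    push_cast [hp]; ring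
  rw [h1]
  apply pvIntExt
  intro j
  rw [pvTbBand, pvTbNot, pvTbCast,
      pvItbS (k+2) m (2^(k+1) - 1) j (by
        have h2 : (2:ℕ)^(k+2) = 2*2^(k+1) := by ring
        have h3 : (1:ℕ) ≤ 2^(k+1) := Nat.one_le_two_pow
        omega),
      pvItbS (k+2) m (2^(k+1)) j (by
        have h2 : (2:ℕ)^(k+2) = 2*2^(k+1) := by ring
        have h3 : (1:ℕ) ≤ 2^(k+1) := Nat.one_le_two_pow
        omega),
      Nat.testBit_two_pow]
  rcases Nat.lt_or_ge j (k+2) with h | h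
  · rw [if_pos h, if_pos h, Nat.testBit_two_pow_sub_one]
    rcases Nat.lt_trichotomy j (k+1) with h3 | h3 | h3
    · simp [h3, show ¬ (k+1 = j) by omega]
    · simp [h3, show ¬ (j < j) by omega]
    · omega
  · rw [if_neg (by omega), if_neg (by omega)]
    simp [show ¬ (k+1 = j) by omega]

/- ---------- structure of the input ---------- -/

-- 2-adic valuation
theorem pvEvenVal (y : ℤ) (hy : y ≠ 0) : ∃ (j : ℕ) (u : ℤ), u % 2 = 1 ∧ y = 2^j * u := by
  obtain ⟨n, hn⟩ : ∃ n : ℕ, y.natAbs = n := ⟨y.natAbs, rfl⟩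
  induction n using Nat.strong_induction_on generalizing y with
  | _ n ih =>
    rcases Int.emod_two_eq y with h | h
    · -- even
      obtain ⟨z, hz⟩ : ∃ z, y = 2 * z := ⟨y / 2, by omega⟩
      have hz0 : z ≠ 0 := by omega
      have hlt : z.natAbs < n := by omega
      obtain ⟨j, u, hu, he⟩ := ih z.natAbs hlt z hz0 rfl
      exact ⟨j + 1, u, hu, by rw [hz, he]; ring⟩
    · exact ⟨0, y, h, by ring⟩

-- every odd integer except -1: num = 2^(k+2) m + (2^(k+1) - 1)
theorem pvOddSplit (x : ℤ) (hodd : x % 2 = 1) (hne : x ≠ -1) :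
    ∃ (k : ℕ) (m : ℤ), x = (2^(k+2) : ℤ)*m + ((2^(k+1) - 1 : ℕ) : ℤ) := by
  have h0 : x + 1 ≠ 0 := by omega
  obtain ⟨j, u, hu, he⟩ := pvEvenVal (x + 1) h0
  have hj : j ≠ 0 := by
    rintro rfl
    simp at he
    omega
  obtain ⟨K, rfl⟩ : ∃ K, j = K + 1 := ⟨j - 1, by omega⟩
  obtain ⟨m, hm⟩ : ∃ m, u = 2 * m + 1 := ⟨(u-1)/2, by omega⟩
  refine ⟨K, m, ?_⟩
  have hc : (((2^(K+1) - 1 : ℕ)) : ℤ) = 2^(K+1) - 1 := by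
    have : (1:ℕ) ≤ 2^(K+1) := Nat.one_le_two_pow
    push_cast [this]
    ring
  rw [hc]
  have : x = 2^(K+1) * u - 1 := by omega
  rw [this, hm]
  ring


-- bit decomposition of an arbitrary integer at position i
theorem pvDec (x : ℤ) (i : ℕ) :
    ∃ (q : ℤ) (d r : ℕ), (d = 0 ∨ d = 1) ∧ r < 2^i ∧ x = (2^(i+1) : ℤ)*q + (d : ℤ)*((2^i : ℕ) : ℤ) + ((r : ℕ) : ℤ) := by
  set P : ℤ := ((2^i : ℕ) : ℤ) with hP
  have hPpos : 0 < P := by positivity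
  have hP2 : ((2^(i+1) : ℤ)) = 2 * P := by rw [hP]; push_cast; ring
  set R : ℤ := x % (2*P) with hR
  have hR0 : 0 ≤ R := Int.emod_nonneg x (by omega)
  have hRlt : R < 2*P := Int.emod_lt_of_pos x (by omega)
  have hx : x = 2*P * (x / (2*P)) + R := by
    rw [hR]
    rw [Int.mul_ediv_add_emod]  -- ? name: check
  rcases lt_or_ge R P with h | h
  · refine ⟨x / (2*P), 0, R.toNat, Or.inl rfl, by omega, ?_⟩
    push_cast
    rw [hP2]
    omega
  · refine ⟨x / (2*P), 1, (R - P).toNat, Or.inr rfl, by omega, ?_⟩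
    push_cast
    rw [hP2]
    omega

theorem pvKltN (k : ℕ) (m : ℤ) :
    k < PySem.Int.bitLength ((2^(k+2) : ℤ)*m + ((2^(k+1) - 1 : ℕ) : ℤ)) := by
  set num : ℤ := (2^(k+2) : ℤ)*m + ((2^(k+1) - 1 : ℕ) : ℤ) with hnum
  have hcast : (((2^(k+1) - 1 : ℕ)) : ℤ) = 2^(k+1) - 1 := by
    have : (1:ℕ) ≤ 2^(k+1) := Nat.one_le_two_pow
    push_cast [this]; ring
  have hbig : 2^k ≤ num.natAbs := by
    rcases lt_or_ge m 0 with hm | hm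
    · have h1 : num ≤ -(2^(k+1)) - 1 := by
        rw [hnum, hcast]
        have h2 : (2:ℤ)^(k+2) = 4 * 2^k := by ring
        have h3 : (2:ℤ)^(k+1) = 2 * 2^k := by ring
        have h4 : (2:ℤ)^(k+2) * m ≤ -(2^(k+2)) := by nlinarith [pow_pos (show (0:ℤ) < 2 by norm_num) k]
        nlinarith [pow_pos (show (0:ℤ) < 2 by norm_num) k]
      have h5 : (0:ℤ) < 2^k := pow_pos (by norm_num) k
      have h6 : num ≤ -(2^k) := by
        have : (2:ℤ)^(k+1) = 2 * 2^k := by ring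
        omega
      have : (2^k : ℤ) ≤ -num := by omega
      omega
    · have h1 : 2^(k+1) - 1 ≤ num := by
        rw [hnum, hcast]
        have h4 : (0:ℤ) ≤ (2:ℤ)^(k+2) * m := by positivity
        omega
      have h5 : (0:ℤ) < 2^k := pow_pos (by norm_num) k
      have h6 : (2^k : ℤ) ≤ num := by
        have : (2:ℤ)^(k+1) = 2 * 2^k := by ring
        omega
      omega
  have hlt := PySem.Int.lt_two_pow_bitLength num
  have : (2:ℕ)^k < 2^(PySem.Int.bitLength num) := lt_of_le_of_lt (by exact_mod_cast hbig) hlt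
  exact (Nat.pow_lt_pow_iff_right (by norm_num)).mp this

/- ---------- A's inner loop ---------- -/

def pvInner (num : Int) (val : Option Int) (i : Int) : Option Int :=
  let temp : Int := PySem.Int.band num (Int.not ((1 : Int) <<< (i.toNat : Int)))
  let val : Option Int :=
    if PySem.Int.bor temp (temp + 1) == num then
      some (match val with | none => temp | some v => min temp v)
    else val
  if PySem.Int.bor temp (temp - 1) == num then
    some (match val with | none => temp - 1 | some v => min (temp - 1) v)
  else val

def pvBodyA (num : Int) : Int :=
  match (PySem.List.pyRange 0 ((PySem.Int.bitLength num : Int) + 1) 1).foldl (pvInner num) none with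
  | none => -1
  | some v => v

def pvNum (k : ℕ) (m : ℤ) : ℤ := (2^(k+2) : ℤ)*m + ((2^(k+1) - 1 : ℕ) : ℤ)

theorem pvNumCast (k : ℕ) (m : ℤ) : pvNum k m = (2^(k+2) : ℤ)*m + 2^(k+1) - 1 := by
  rw [pvNum]
  have h : (1:ℕ) ≤ 2^(k+1) := Nat.one_le_two_pow
  push_cast [h]
  ring

theorem pvNumOdd (k : ℕ) (m : ℤ) : pvNum k m = 2*((2^(k+1) : ℤ)*m + 2^k - 1) + 1 := by
  rw [pvNumCast]; ring

-- step at 1 ≤ i ≤ k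

theorem pvModTwo (x : ℤ) : PySem.Int.mod x 2 = x % 2 := by
  show x.fmod 2 = x % 2
  rw [Int.fmod_eq_emod, if_pos (Or.inl (by norm_num)), add_zero]

theorem pvStepLow (k : ℕ) (m : ℤ) (i : ℕ) (h1 : 1 ≤ i) (h2 : i ≤ k) (v : ℤ) :
    pvInner (pvNum k m) (some v) (i : ℤ) = some (min (pvNum k m - 2^i) v) := by
  obtain ⟨c, rfl⟩ : ∃ c, k = i + c := ⟨k - i, by omega⟩
  set num := pvNum (i + c) m with hnum
  set q : ℤ := (2^(c+1) : ℤ)*m + 2^c - 1 with hq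
  have hdec : num = (2^(i+1) : ℤ)*q + (2^i : ℕ) + ((2^i - 1 : ℕ) : ℤ) := by
    rw [hnum, pvNumCast, hq]
    have hi : (1:ℕ) ≤ 2^i := Nat.one_le_two_pow
    push_cast [hi]
    rw [show i + c + 2 = (i+1) + (c+1) from by ring, pow_add, show i + c + 1 = (i+1) + c from by ring, pow_add, pow_succ]
    ring
  have htemp : PySem.Int.band num (Int.not ((1:ℤ) <<< (((i:ℤ)).toNat : ℤ))) = num - 2^i := by
    rw [Int.toNat_natCast, pvShl, hdec, pvMset i q (2^i - 1) (by have := Nat.one_le_two_pow (n := i); omega)]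
    have hi : (1:ℕ) ≤ 2^i := Nat.one_le_two_pow
    push_cast [hi]
    ring
  have hshape : num - 2^i = (2^(i+1) : ℤ)*q + ((2^i - 1 : ℕ) : ℤ) := by
    rw [hdec]
    have hi : (1:ℕ) ≤ 2^i := Nat.one_le_two_pow
    push_cast [hi]
    ring
  have hcond1 : PySem.Int.bor (num - 2^i) (num - 2^i + 1) = num := by
    rw [hshape, pvM2 i q, ← hshape]
    ring
  have hcond2 : PySem.Int.bor (num - 2^i) (num - 2^i - 1) ≠ num := by
    obtain ⟨i', rfl⟩ : ∃ i', i = i' + 1 := ⟨i - 1, by omega⟩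
    set Q : ℤ := 2^(i'+1)*q + 2^i' - 1 with hQ
    have ho : num - 2^(i'+1) = 2*Q + 1 := by
      rw [hshape, hQ]
      have hi : (1:ℕ) ≤ 2^(i'+1) := Nat.one_le_two_pow
      push_cast [hi]
      ring
    have ho2 : num - 2^(i'+1) - 1 = 2*Q := by omega
    rw [ho2, ho, pvM3 Q, ← ho]
    have : (0:ℤ) < 2^(i'+1) := by positivity
    omega
  rw [pvInner]
  simp only [htemp, beq_iff_eq]
  rw [if_pos hcond1, if_neg hcond2]

-- step at i = 0 from empty accumulator

theorem pvStepZero (k : ℕ) (m : ℤ) :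
    pvInner (pvNum k m) none (0 : ℤ) = some (if k = 0 then pvNum k m - 1 else pvNum k m - 2) := by
  set num := pvNum k m with hnum
  set q0 : ℤ := (2^(k+1) : ℤ)*m + 2^k - 1 with hq0
  have hdec : num = (2^(0+1) : ℤ)*q0 + (2^0 : ℕ) + ((0 : ℕ) : ℤ) := by
    rw [hnum, pvNumCast, hq0]
    push_cast
    rw [show k + 2 = 1 + (k+1) from by ring, pow_add, show k + 1 = 1 + k from by ring, pow_add]
    ring
  have htemp : PySem.Int.band num (Int.not ((1:ℤ) <<< (((0:ℤ)).toNat : ℤ))) = num - 1 := by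
    rw [show (((0:ℤ)).toNat : ℤ) = ((0:ℕ) : ℤ) from rfl, pvShl 0, hdec, pvMset 0 q0 0 (by norm_num)]
    push_cast
    ring
  have hshape : num - 1 = (2^(0+1) : ℤ)*q0 + ((2^0 - 1 : ℕ) : ℤ) := by
    rw [hdec]
    push_cast
    ring
  have hcond1 : PySem.Int.bor (num - 1) (num - 1 + 1) = num := by
    rw [hshape, pvM2 0 q0, ← hshape]
    ring
  rcases Nat.eq_zero_or_pos k with hk | hk
  · -- k = 0 : second condition fails (check bit 1)
    subst hk
    have hm1 : num - 1 = (2^2 : ℤ)*m + ((0 : ℕ) : ℤ) := by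
      rw [hnum, pvNumCast]; push_cast; ring
    have hm2 : num - 1 - 1 = (2^2 : ℤ)*(m - 1) + ((3 : ℕ) : ℤ) := by
      rw [hnum, pvNumCast]; push_cast; ring
    have hm3 : num = (2^2 : ℤ)*m + ((1 : ℕ) : ℤ) := by
      rw [hnum, pvNumCast]; push_cast; ring
    have hcond2 : PySem.Int.bor (num - 1) (num - 1 - 1) ≠ num := by
      apply pvTbNe 1
      rw [pvTbBor, hm2, hm1, hm3, pvItbS 2 m 0 1 (by norm_num),
          pvItbS 2 (m-1) 3 1 (by norm_num), pvItbS 2 m 1 1 (by norm_num)]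
      norm_num
      decide
    rw [pvInner]
    simp only [htemp, beq_iff_eq]
    rw [if_pos hcond1, if_neg hcond2]
    simp
  · -- k ≥ 1 : second condition holds with candidate num - 2
    obtain ⟨k', rfl⟩ : ∃ k', k = k' + 1 := ⟨k - 1, by omega⟩
    set q2 : ℤ := (2^(k'+1) : ℤ)*m + 2^k' - 1 with hq2
    have hm2 : num - 1 - 1 = (2^(1+1) : ℤ)*q2 + ((2^1 - 1 : ℕ) : ℤ) := by
      rw [hnum, pvNumCast, hq2]
      push_cast
      rw [show k' + 1 + 2 = 2 + (k'+1) from by ring, pow_add, show k' + 1 + 1 = 2 + k' from by ring, pow_add]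
      ring
    have hcond2 : PySem.Int.bor (num - 1) (num - 1 - 1) = num := by
      rw [show PySem.Int.bor (num - 1) (num - 1 - 1) = PySem.Int.bor (num - 1 - 1) (num - 1) from PySem.Int.bor_comm _ _,
          hm2, show num - 1 = ((2^(1+1) : ℤ)*q2 + ((2^1 - 1 : ℕ) : ℤ)) + 1 from by rw [← hm2]; ring,
          pvM2 1 q2, ← hm2]
      have h2 : (2:ℤ)^1 = 2 := by norm_num
      omega
    rw [pvInner]
    simp only [htemp, beq_iff_eq]
    rw [if_pos hcond1, if_pos hcond2]
    show some (min (num - 1 - 1) (num - 1)) = some (if k' + 1 = 0 then num - 1 else num - 2)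
    rw [min_eq_left (by omega : num - 1 - 1 ≤ num - 1)]
    simp only [show ¬ (k' + 1 = 0) from by omega, if_false]
    congr 1
    ring

theorem pvStepHigh (k : ℕ) (m : ℤ) (i : ℕ) (hi : k+1 ≤ i) (v : ℤ) (hv : v ≤ pvNum k m - 1) :
    pvInner (pvNum k m) (some v) (i : ℤ) = some v := by
  set num := pvNum k m with hnum
  obtain ⟨q, d, r, hd, hr, hx⟩ := pvDec num i
  have hoddnum : num = 2*((2^(k+1) : ℤ)*m + 2^k - 1) + 1 := pvNumOdd k m
  rcases hd with hd | hd
  · -- bit i of num is clear: temp = num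
    subst hd
    have hx' : num = (2^(i+1) : ℤ)*q + ((r : ℕ) : ℤ) := by rw [hx]; push_cast; ring
    have htemp : PySem.Int.band num (Int.not ((1:ℤ) <<< (((i:ℤ)).toNat : ℤ))) = num := by
      rw [Int.toNat_natCast, pvShl]
      conv_lhs => rw [hx']
      rw [pvMclear i q r hr, ← hx']
    have hshape : num = (2^(k+1+1) : ℤ)*m + ((2^(k+1) - 1 : ℕ) : ℤ) := by rw [hnum, pvNum]
    have hcond1 : PySem.Int.bor num (num + 1) ≠ num := by
      conv_lhs => rw [hshape]
      rw [pvM2 (k+1) m, ← hshape]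
      have : (0:ℤ) < 2^(k+1) := by positivity
      omega
    have hcond2 : PySem.Int.bor num (num - 1) = num := by
      conv_lhs => rw [hoddnum, show 2*((2^(k+1) : ℤ)*m + 2^k - 1) + 1 - 1 = 2*((2^(k+1) : ℤ)*m + 2^k - 1) from by ring]
      rw [pvM3, ← hoddnum]
    rw [pvInner]
    simp only [htemp, beq_iff_eq]
    rw [if_neg hcond1, if_pos hcond2]
    show some (min (num - 1) v) = some v
    rw [min_eq_right hv]
  · -- bit i of num is set: only possible for i ≥ k+2, temp = num - 2^i
    subst hd
    have hik : k + 2 ≤ i := by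
      rcases Nat.lt_or_ge i (k+2) with h | h
      · exfalso
        have hieq : i = k + 1 := by omega
        subst hieq
        have P := ((2:ℤ)^(k+1))
        have hm1 : num % ((2^(k+2) : ℤ)) = ((2^(k+1) - 1 : ℕ) : ℤ) := by
          rw [hnum, pvNum, show (2^(k+2) : ℤ)*m + ((2^(k+1) - 1 : ℕ) : ℤ) = ((2^(k+1) - 1 : ℕ) : ℤ) + (2^(k+2) : ℤ)*m from by ring,
              Int.add_mul_emod_self_left]
          apply Int.emod_eq_of_lt (by positivity)
          have h1 : (2^(k+1) : ℕ) - 1 < 2^(k+2) := by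
            have h2 : (2:ℕ)^(k+2) = 2*2^(k+1) := by ring
            have h3 : (1:ℕ) ≤ 2^(k+1) := Nat.one_le_two_pow
            omega
          calc ((2^(k+1) - 1 : ℕ) : ℤ) < ((2^(k+2) : ℕ) : ℤ) := by exact_mod_cast h1
            _ = (2^(k+2) : ℤ) := by push_cast; ring
        have hm2 : num % ((2^(k+2) : ℤ)) = ((2^(k+1) : ℕ) : ℤ) + ((r : ℕ) : ℤ) := by
          have hx2 : num = ((2^(k+1) : ℕ) : ℤ) + ((r : ℕ) : ℤ) + (2^(k+2) : ℤ)*q := by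
            rw [hx]; push_cast; ring
          rw [hx2, Int.add_mul_emod_self_left]
          apply Int.emod_eq_of_lt (by positivity)
          have h1 : 2^(k+1) + r < 2^(k+2) := by
            have h2 : (2:ℕ)^(k+2) = 2*2^(k+1) := by ring
            omega
          calc ((2^(k+1) : ℕ) : ℤ) + ((r : ℕ) : ℤ) = ((2^(k+1) + r : ℕ) : ℤ) := by push_cast; ring
            _ < ((2^(k+2) : ℕ) : ℤ) := by exact_mod_cast h1
            _ = (2^(k+2) : ℤ) := by push_cast; ring
        rw [hm1] at hm2
        have hc1 : ((2^(k+1) - 1 : ℕ) : ℤ) = ((2^(k+1) : ℕ) : ℤ) - 1 := by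
          have : (1:ℕ) ≤ 2^(k+1) := Nat.one_le_two_pow
          push_cast [this]; ring
        rw [hc1] at hm2
        have hrpos : (0:ℤ) ≤ ((r:ℕ) : ℤ) := by positivity
        omega
      · omega
    obtain ⟨c, rfl⟩ : ∃ c, i = k + 2 + c := ⟨i - (k+2), by omega⟩
    set W : ℤ := m - 2^c with hW
    have hx' : num = (2^(k+2+c+1) : ℤ)*q + ((2^(k+2+c) : ℕ)) + ((r : ℕ) : ℤ) := by
      rw [hx]; push_cast; ring
    have htemp : PySem.Int.band num (Int.not ((1:ℤ) <<< (((k+2+c : ℕ):ℤ).toNat : ℤ))) = num - 2^(k+2+c) := by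
      rw [Int.toNat_natCast, pvShl]
      conv_lhs => rw [hx']
      rw [pvMset (k+2+c) q r hr]
      rw [hx']
      push_cast
      ring
    have hshapeT : num - 2^(k+2+c) = (2^(k+1+1) : ℤ)*W + ((2^(k+1) - 1 : ℕ) : ℤ) := by
      rw [hnum, pvNum, hW]
      rw [show k+2+c = (k+2) + c from rfl, pow_add]
      push_cast
      ring
    have hlt : (2:ℤ)^(k+1) < 2^(k+2+c) := by
      apply pow_lt_pow_right₀ (by norm_num)
      omega
    have hcond1 : PySem.Int.bor (num - 2^(k+2+c)) (num - 2^(k+2+c) + 1) ≠ num := by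
      rw [hshapeT, pvM2 (k+1) W, ← hshapeT]
      omega
    have hoddT : num - 2^(k+2+c) = 2*((2^(k+1) : ℤ)*W + 2^k - 1) + 1 := by
      rw [hshapeT]
      have h1 : (1:ℕ) ≤ 2^(k+1) := Nat.one_le_two_pow
      push_cast [h1]
      ring
    have hcond2 : PySem.Int.bor (num - 2^(k+2+c)) (num - 2^(k+2+c) - 1) ≠ num := by
      rw [hoddT, show 2*((2^(k+1) : ℤ)*W + 2^k - 1) + 1 - 1 = 2*((2^(k+1) : ℤ)*W + 2^k - 1) from by ring,
          pvM3, ← hoddT]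
      have : (0:ℤ) < 2^(k+2+c) := by positivity
      omega
    rw [pvInner]
    simp only [htemp, beq_iff_eq]
    rw [if_neg hcond1, if_neg hcond2]

theorem pvPortA_eq (nums : List Int) : minBitwiseArray nums = nums.map pvBodyA := by
  have h : minBitwiseArray nums = List.foldl (fun ans num => ans ++ [pvBodyA num]) [] nums := by
    with_unfolding_all rfl
  rw [h, PySem.List.foldl_append_singleton_eq_map]
  simp

-- even num: the loop never finds a candidate
theorem pvEvenStep (num : ℤ) (heven : num % 2 = 0) (val : Option Int) (i : ℤ) :
    pvInner num val i = val := by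
  rw [pvInner.eq_def]
  set t : ℤ := PySem.Int.band num (Int.not ((1 : Int) <<< (i.toNat : Int))) with ht
  have hc1 : PySem.Int.bor t (t + 1) ≠ num := by
    apply pvTbNe 0
    rw [pvTbBor, pvItbZero, pvItbZero, pvItbZero]
    rcases Int.emod_two_eq t with h | h
    · have h2 : (t+1) % 2 = 1 := by omega
      simp [h, h2, heven]
    · simp [h, heven]
  have hc2 : PySem.Int.bor t (t - 1) ≠ num := by
    apply pvTbNe 0
    rw [pvTbBor, pvItbZero, pvItbZero, pvItbZero]
    rcases Int.emod_two_eq t with h | h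
    · have h2 : (t-1) % 2 = 1 := by omega
      simp [h, h2, heven]
    · simp [h, heven]
  simp only [beq_iff_eq]
  rw [if_neg hc1, if_neg hc2]

theorem pvEvenFold (num : ℤ) (heven : num % 2 = 0) (j : ℕ) :
    (PySem.List.pyRange 0 (j : ℤ) 1).foldl (pvInner num) none = none := by
  induction j with
  | zero =>
    rw [show ((0:ℕ):ℤ) = 0 from rfl, PySem.List.pyRange_one_eq_nil (le_refl 0)]
    rfl
  | succ j ih =>
    have hc : ((j+1 : ℕ) : ℤ) = (j : ℤ) + 1 := by push_cast; ring
    rw [hc, PySem.List.pyRange_one_succ_right (by positivity), List.foldl_append, ih]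
    exact pvEvenStep num heven none j

-- the invariant of A's inner loop on odd num = 2^(k+2) m + 2^(k+1) - 1
theorem pvInv (k : ℕ) (m : ℤ) (j : ℕ) (hj : 1 ≤ j) :
    (PySem.List.pyRange 0 (j : ℤ) 1).foldl (pvInner (pvNum k m)) none =
      some (pvNum k m - 2^(min (max (j-1) 1) k)) := by
  induction j with
  | zero => omega
  | succ j ih =>
    have hc : ((j+1 : ℕ) : ℤ) = (j : ℤ) + 1 := by push_cast; ring
    rw [hc, PySem.List.pyRange_one_succ_right (by positivity), List.foldl_append]
    rcases Nat.eq_zero_or_pos j with hj0 | hj0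
    · -- j = 0 : base case, the fold over [] then step at 0
      subst hj0
      rw [show ((0:ℕ):ℤ) = 0 from rfl, PySem.List.pyRange_one_eq_nil (le_refl 0)]
      show pvInner (pvNum k m) none (0 : ℤ) = _
      rw [pvStepZero]
      rcases Nat.eq_zero_or_pos k with hk | hk
      · subst hk
        norm_num
      · rw [if_neg (by omega), show min (max (1-1) 1) k = 1 from by omega]
        norm_num
    · rw [ih hj0]
      simp only [List.foldl_cons, List.foldl_nil]
      rcases Nat.lt_or_ge k j with hjk2 | hjk2
      · -- j ≥ k+1 : no change
        rw [pvStepHigh k m j (by omega) _ (by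
          have : (0:ℤ) < 2^(min (max (j-1) 1) k) := by positivity
          omega)]
        rw [show min (max (j-1) 1) k = min (max (j+1-1) 1) k from by omega]
      · -- 1 ≤ j ≤ k : strict improvement
        rw [pvStepLow k m j hj0 hjk2]
        have he : min (max (j-1) 1) k ≤ j := by omega
        rw [min_eq_left (by
          have : (2:ℤ)^(min (max (j-1) 1) k) ≤ 2^j := pow_le_pow_right₀ (by norm_num) he
          omega)]
        rw [show min (max (j+1-1) 1) k = j from by omega]

-- per-element agreement away from -1
theorem pvMain (num : Int) (hne : num ≠ -1) : pvBodyA num = pvBest num := by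
  rcases Int.emod_two_eq num with h | h
  · -- even
    have hfold := pvEvenFold num h (PySem.Int.bitLength num + 1)
    have hc : ((PySem.Int.bitLength num + 1 : ℕ) : ℤ) = (PySem.Int.bitLength num : ℤ) + 1 := by push_cast; ring
    rw [hc] at hfold
    unfold pvBodyA pvBest
    rw [hfold, if_pos (by rw [beq_iff_eq, pvModTwo, h])]
  · -- odd
    obtain ⟨k, m, he⟩ := pvOddSplit num h hne
    subst he
    set num := (2^(k+2) : ℤ)*m + ((2^(k+1) - 1 : ℕ) : ℤ) with hnum
    have hN := pvKltN k m
    set N := PySem.Int.bitLength num with hNdef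
    have hc : (N : ℤ) + 1 = ((N + 1 : ℕ) : ℤ) := by push_cast; ring
    have hfold := pvInv k m (N+1) (by omega)
    rw [show pvNum k m = num from rfl] at hfold
    rw [show min (max (N+1-1) 1) k = k from by omega] at hfold
    unfold pvBodyA
    rw [← hNdef, hc, hfold]
    show num - 2^k = pvBest num
    unfold pvBest
    rw [if_neg (by rw [beq_iff_eq, pvModTwo, h]; norm_num)]
    show num - 2^k = PySem.Int.band num (Int.not ((PySem.Int.band (Int.not num) (num + 1)) >>> (1 : ℕ)))
    have hb : PySem.Int.band (Int.not num) (num + 1) = ((2^(k+1) : ℕ) : ℤ) := pvM6 k m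
    rw [hb, pvShr, show (2^(k+1) / 2 : ℕ) = 2^k from by rw [pow_succ]; omega]
    have hdec : num = (2^(k+1) : ℤ)*(2*m) + ((2^k : ℕ) : ℤ) + ((2^k - 1 : ℕ) : ℤ) := by
      rw [hnum]
      have h1 : (1:ℕ) ≤ 2^k := Nat.one_le_two_pow
      have h2 : (1:ℕ) ≤ 2^(k+1) := Nat.one_le_two_pow
      push_cast [h1, h2]
      ring
    conv_rhs => rw [hdec]
    rw [pvMset k (2*m) (2^k - 1) (by have := Nat.one_le_two_pow (n := k); omega)]
    rw [hdec]
    have h1 : (1:ℕ) ≤ 2^k := Nat.one_le_two_pow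
    push_cast [h1]
    ring

-- ===== VERDICT (by name: the statement is the Claim_ definition above) =====
theorem minBitwiseArray_spec : Claim_unchanged_minBitwiseArray := by
  intro nums _ hD
  rw [pvPortA_eq]
  unfold minBitwiseArray_alt
  exact List.map_congr_left (fun x hx => pvMain x (fun hx1 => hD (show (-1:Int) ∈ nums by rw [← hx1]; exact hx)))

theorem minBitwiseArray_changed : Claim_changed_minBitwiseArray := by
  unfold Claim_changed_minBitwiseArray; decide

theorem minBitwiseArray_tight : Claim_exact_minBitwiseArray := by
  intro nums _ hD heq
  rw [pvPortA_eq] at heq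
  unfold minBitwiseArray_alt at heq
  have := (List.map_inj_left).mp heq (-1) hD
  have hA : pvBodyA (-1) = -3 := by decide
  have hB : pvBest (-1) = -1 := by decide
  rw [hA, hB] at this
  exact absurd this (by decide)
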